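-- pv_equiv track=rewrite | github.com/glogwa68/GenomicAlgo | tools.py | diviser_elements
-- ===== SOURCE A (Python) =====
-- def diviser_elements(liste, number: int):
--     nouvelle_liste = []
--     for element in range(number):
--         for sous_liste in liste:
--             try:
--                 nouvelle_liste.append(sous_liste[element])
--             except: pass
--     return nouvelle_liste
-- ===== SOURCE B (Python) =====
-- def diviser_elements(liste, number: int):
--     n = max(number, 0)
--     columns = [[] for _ in range(n)]
--     for sous_liste in liste:
--         for i, x in enumerate(sous_liste[:n]):
--             columns[i].append(x)
--     return [x for col in columns for x in col]
-- ===== Notes on version B (the rewrite author's own statement) =====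
-- stated objective: faster
-- what changed: B makes a single pass over the sublists, distributing elements into per-column bucket lists and flattening them, instead of A's column-by-column rescanning of the whole list for every index in range(number).
import Mathlib
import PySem

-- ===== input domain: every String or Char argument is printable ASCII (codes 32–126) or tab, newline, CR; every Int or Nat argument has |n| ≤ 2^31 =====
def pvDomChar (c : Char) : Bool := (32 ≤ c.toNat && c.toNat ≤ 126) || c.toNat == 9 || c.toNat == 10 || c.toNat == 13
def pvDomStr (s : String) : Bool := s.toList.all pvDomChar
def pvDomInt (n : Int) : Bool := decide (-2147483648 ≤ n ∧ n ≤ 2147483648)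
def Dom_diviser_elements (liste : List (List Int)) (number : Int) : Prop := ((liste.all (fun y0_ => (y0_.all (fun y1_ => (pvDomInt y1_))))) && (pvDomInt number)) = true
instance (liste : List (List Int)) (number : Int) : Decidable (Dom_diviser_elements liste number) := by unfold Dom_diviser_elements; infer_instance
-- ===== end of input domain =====

-- B: one pass over the sublists distributing elements into per-column buckets, then flatten,
-- instead of A's per-column rescans of the whole list.

-- ===== PORT A =====
-- literal port of A: for element in range(number): for sous_liste in liste: try append sous_liste[element]
def diviser_elements (liste : List (List Int)) (number : Int) : List Int :=
  (PySem.List.pyRange 0 number 1).foldl (fun nouvelle_liste element =>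
    liste.foldl (fun nouvelle_liste sous_liste =>
      match PySem.List.pyGet? sous_liste element with   -- try: …[element]; except: pass
      | some v => nouvelle_liste ++ [v]
      | none   => nouvelle_liste) nouvelle_liste) []

-- ===== PORT B =====
-- literal port of Source B: bucket list per column, single pass, flatten
def diviser_elements_alt (liste : List (List Int)) (number : Int) : List Int :=
  let n := (max number 0).toNat
  let columns : List (List Int) := List.replicate n []
  let columns := liste.foldl (fun cols sous_liste =>
    ((sous_liste.take n).zipIdx).foldl (fun cols p =>
      cols.set p.2 (cols.getD p.2 [] ++ [p.1])) cols) columns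
  columns.flatten

-- ===== PRECONDITION & SPEC =====
def Spec_diviser_elements (liste : List (List Int)) (number : Int) (out : List Int) : Prop := out = diviser_elements_alt liste number
instance (liste : List (List Int)) (number : Int) (out : List Int) : Decidable (Spec_diviser_elements liste number out) := by unfold Spec_diviser_elements; infer_instance

-- ===== CLAIM (what is proved, stated in full; the proofs are below) =====
def Claim_equal_diviser_elements : Prop := ∀ (liste : List (List Int)) (number : Int), Dom_diviser_elements liste number → Spec_diviser_elements liste number (diviser_elements liste number)

-- ===== LEMMAS AND PROOFS =====

-- column i of the final answer: the i-th elements of all sublists (skipping short ones), truncated at n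
def colFun (n : Nat) (p : List (List Int)) (i : Nat) : List Int :=
  p.filterMap (fun sl => (sl.take n)[i]?)

-- the inner bucket-fold of B, per index
theorem inner_get? (t : List Int) (k : Nat) (cols : List (List Int)) (i : Nat)
    (h : t.length + k ≤ cols.length) :
    ((t.zipIdx k).foldl (fun cols p => cols.set p.2 (cols.getD p.2 [] ++ [p.1])) cols)[i]? =
      cols[i]?.map (· ++ (if k ≤ i then (t[i - k]?).toList else [])) := by
  induction t generalizing k cols with
  | nil => simp
  | cons x t ih =>
    have hk : k < cols.length := by simp at h; omega
    simp only [List.zipIdx_cons, List.foldl_cons]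
    rw [ih _ _ (by simp at h ⊢; omega)]
    rcases Nat.lt_trichotomy i k with hik | hik | hik
    · rw [List.getElem?_set_ne (by omega)]
      have : ¬ k ≤ i := by omega
      have : ¬ (k+1) ≤ i := by omega
      simp [*]
    · subst hik
      rw [List.getElem?_set_self hk]
      simp [List.getD, List.getElem?_eq_getElem hk]
    · rw [List.getElem?_set_ne (by omega)]
      have h1 : k ≤ i := by omega
      have h2 : k + 1 ≤ i := by omega
      have h3 : (x :: t)[i - k]? = t[i - (k+1)]? := by
        have : i - k = (i - (k+1)) + 1 := by omega
        rw [this]; simp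
      simp [h1, h2, h3]

-- one step of B's outer loop, on the column description
theorem step_eq (n : Nat) (p : List (List Int)) (sl : List Int) :
    ((sl.take n).zipIdx).foldl (fun cols p => cols.set p.2 (cols.getD p.2 [] ++ [p.1]))
        ((List.range n).map (colFun n p)) =
      (List.range n).map (colFun n (p ++ [sl])) := by
  apply List.ext_getElem?
  intro i
  rw [inner_get? _ 0 _ i (by simp only [List.length_take, List.length_map, List.length_range]; omega)]
  by_cases hi : i < n
  · simp only [List.getElem?_map, List.getElem?_range, hi, Option.map_some]
    congr 1
    simp only [colFun, List.filterMap_append, List.filterMap_cons, List.filterMap_nil, Nat.sub_zero,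
      Nat.zero_le, if_true]
    cases h : (sl.take n)[i]? <;> simp
  · have h1 : ((List.range n).map (colFun n p))[i]? = none := by
      rw [List.getElem?_eq_none]; simpa using Nat.le_of_not_lt hi
    have h2 : ((List.range n).map (colFun n (p ++ [sl])))[i]? = none := by
      rw [List.getElem?_eq_none]; simpa using Nat.le_of_not_lt hi
    rw [h1, h2]; rfl

-- B's whole pass over the sublists
theorem foldB (n : Nat) (l : List (List Int)) : ∀ (p : List (List Int)),
    l.foldl (fun cols sous_liste =>
        ((sous_liste.take n).zipIdx).foldl (fun cols p =>
          cols.set p.2 (cols.getD p.2 [] ++ [p.1])) cols)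
      ((List.range n).map (colFun n p)) =
      (List.range n).map (colFun n (p ++ l)) := by
  induction l with
  | nil => simp
  | cons sl l ih =>
    intro p
    simp only [List.foldl_cons, step_eq n p sl, ih (p ++ [sl]), List.append_assoc,
      List.singleton_append]

theorem B_eq (liste : List (List Int)) (number : Int) :
    diviser_elements_alt liste number =
      (List.range (max number 0).toNat).flatMap (colFun (max number 0).toNat liste) := by
  simp only [diviser_elements_alt]
  have h0 : List.replicate (max number 0).toNat ([] : List Int) =
      (List.range (max number 0).toNat).map (colFun (max number 0).toNat []) := by
    have hc : colFun (max number 0).toNat [] = fun _ => [] := funext fun i => by simp [colFun]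
    rw [hc]; simp
  rw [h0, foldB, List.nil_append, List.flatMap_def]

-- A's inner loop
theorem foldA_inner (l : List (List Int)) (e : Int) : ∀ (acc : List Int),
    l.foldl (fun acc sl =>
      match PySem.List.pyGet? sl e with
      | some v => acc ++ [v]
      | none   => acc) acc = acc ++ l.filterMap (fun sl => PySem.List.pyGet? sl e) := by
  induction l with
  | nil => simp
  | cons sl l ih =>
    intro acc
    simp only [List.foldl_cons, List.filterMap_cons]
    cases h : PySem.List.pyGet? sl e with
    | none => simp [ih]
    | some v => simp [ih]

theorem A_eq (liste : List (List Int)) (number : Int) :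
    diviser_elements liste number =
      (PySem.List.pyRange 0 number 1).flatMap
        (fun e => liste.filterMap (fun sl => PySem.List.pyGet? sl e)) := by
  unfold diviser_elements
  simp only [foldA_inner]
  rw [PySem.List.foldl_append_eq_flatMap, List.nil_append]

-- ===== VERDICT (by name: the statement is the Claim_ definition above) =====
theorem diviser_elements_spec : Claim_equal_diviser_elements := by
  intro liste number _
  show diviser_elements liste number = diviser_elements_alt liste number
  rw [A_eq, B_eq, PySem.List.pyRange_one]
  have hn : (number - 0).toNat = (max number 0).toNat := by omega
  rw [hn, List.flatMap_def, List.flatMap_def, List.map_map]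
  congr 1
  apply List.map_congr_left
  intro k hk
  have hk' : k < (max number 0).toNat := List.mem_range.mp hk
  simp only [Function.comp_apply, zero_add, PySem.List.pyGet?_natCast, colFun]
  apply List.filterMap_congr
  intro sl _
  rw [List.getElem?_take_of_lt hk']
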